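-- pv_equiv track=rewrite | github.com/jsatyler93/codemap | python/idl_parser.py | _count_indent_columns
-- ===== SOURCE A (Python) =====
-- def _count_indent_columns(raw_text: str) -> int:
--     for raw_line in raw_text.splitlines():
--         if not raw_line.strip():
--             continue
--         indent = 0
--         for char in raw_line:
--             if char == " ":
--                 indent += 1
--             elif char == "\t":
--                 indent += 2
--             else:
--                 return indent
--         return indent
--     return 0
-- ===== SOURCE B (Python) =====
-- def _count_indent_columns(raw_text: str) -> int:
--     line = next((l for l in raw_text.splitlines() if l.strip()), None)
--     if line is None:
--         return 0
--     stripped = line.lstrip(" \t")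
--     prefix = line[: len(line) - len(stripped)]
--     return prefix.count(" ") + 2 * prefix.count("\t")
-- ===== Notes on version B (the rewrite author's own statement) =====
-- stated objective: simpler
-- what changed: Replaces A's nested loops with early returns by a locate-then-count decomposition: find the first non-blank line, slice off its leading whitespace prefix via lstrip, and weigh that prefix with two character counts (spaces weight 1, tabs weight 2).
import Mathlib
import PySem

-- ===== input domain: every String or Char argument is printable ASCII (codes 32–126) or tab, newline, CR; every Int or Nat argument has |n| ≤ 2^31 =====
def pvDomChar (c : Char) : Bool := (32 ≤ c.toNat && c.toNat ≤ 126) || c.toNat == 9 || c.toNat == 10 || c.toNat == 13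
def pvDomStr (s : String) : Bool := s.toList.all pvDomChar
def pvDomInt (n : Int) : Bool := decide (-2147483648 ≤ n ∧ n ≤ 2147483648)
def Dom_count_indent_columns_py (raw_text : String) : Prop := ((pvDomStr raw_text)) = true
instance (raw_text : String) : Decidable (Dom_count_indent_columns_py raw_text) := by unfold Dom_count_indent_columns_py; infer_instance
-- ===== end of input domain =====

-- B replaces A's nested early-return loops by locate-the-first-non-blank-line, slice its leading
-- space/tab prefix (via lstrip), and weigh it with two character counts; objective: simpler.


-- ===== PORT A =====
-- inner 'for char in raw_line' loop with its running indent and early return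
def pvALoop : List Char → Int → Int
  | [], indent => indent
  | c :: rest, indent =>
    if c = ' ' then pvALoop rest (indent + 1)
    else if c = '\t' then pvALoop rest (indent + 2)
    else indent

-- outer 'for raw_line in raw_text.splitlines()' loop
def pvALines : List String → Int
  | [] => 0
  | l :: rest =>
    if PySem.Str.strip l = "" then pvALines rest
    else pvALoop l.toList 0

def count_indent_columns_py (raw_text : String) : Int :=
  pvALines (PySem.Str.splitlines raw_text)

-- ===== PORT B =====
def count_indent_columns_py_alt (raw_text : String) : Int :=
  -- next((l for l in raw_text.splitlines() if l.strip()), None)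
  match (PySem.Str.splitlines raw_text).find? (fun l => !(PySem.Str.strip l == "")) with
  | none => 0
  | some line =>
    -- line.lstrip(" \t"): hand port, exact — Python lstrip(chars) drops the leading run of chars
    let stripped := line.toList.dropWhile (fun c => c == ' ' || c == '\t')
    -- line[: len(line) - len(stripped)]
    let pref := PySem.List.slice line.toList none
      (some ((line.toList.length : Int) - (stripped.length : Int)))
    (pref.count ' ' : Int) + 2 * (pref.count '\t' : Int)

-- ===== PRECONDITION & SPEC =====
def Spec_count_indent_columns_py (raw_text : String) (out : Int) : Prop := out = count_indent_columns_py_alt raw_text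
instance (raw_text : String) (out : Int) : Decidable (Spec_count_indent_columns_py raw_text out) := by unfold Spec_count_indent_columns_py; infer_instance

-- ===== CLAIM (what is proved, stated in full; the proofs are below) =====
def Claim_equal_count_indent_columns_py : Prop := ∀ (raw_text : String), Dom_count_indent_columns_py raw_text → Spec_count_indent_columns_py raw_text (count_indent_columns_py raw_text)

-- ===== LEMMAS AND PROOFS =====

-- the slice B takes is exactly the leading space/tab run
theorem pv_prefix_eq_takeWhile (cs : List Char) :
    PySem.List.slice cs none
      (some ((cs.length : Int) - ((cs.dropWhile (fun c => c == ' ' || c == '\t')).length : Int)))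
      = cs.takeWhile (fun c => c == ' ' || c == '\t') := by
  have hle := List.length_dropWhile_le (p := fun c => c == ' ' || c == '\t') (l := cs)
  have hsum := congrArg List.length
    (List.takeWhile_append_dropWhile (p := fun c => c == ' ' || c == '\t') (l := cs))
  simp only [List.length_append] at hsum
  rw [PySem.List.slice_to _ (by omega)]
  have hlen : ((cs.length : Int) - ((cs.dropWhile (fun c => c == ' ' || c == '\t')).length : Int)).toNat
      = (cs.takeWhile (fun c => c == ' ' || c == '\t')).length := by omega
  have hp := List.takeWhile_prefix (p := fun c => c == ' ' || c == '\t') (l := cs)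
  rw [List.prefix_iff_eq_take] at hp
  rw [hlen, ← hp]

-- A's inner loop computes the weighted count of the leading space/tab run
theorem pvALoop_eq (cs : List Char) (ind : Int) :
    pvALoop cs ind = ind
      + ((cs.takeWhile (fun c => c == ' ' || c == '\t')).count ' ' : Int)
      + 2 * ((cs.takeWhile (fun c => c == ' ' || c == '\t')).count '\t' : Int) := by
  induction cs generalizing ind with
  | nil => simp [pvALoop]
  | cons c rest ih =>
    by_cases hsp : c = ' '
    · subst hsp
      simp [pvALoop, ih]
      ring
    · by_cases htb : c = '\t'
      · subst htb
        simp [pvALoop, ih]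
        ring
      · have h1 : (c == ' ') = false := by simpa using hsp
        have h2 : (c == '\t') = false := by simpa using htb
        simp [pvALoop, h1, h2, hsp, htb]

theorem pvALines_eq (lines : List String) :
    pvALines lines = match lines.find? (fun l => !(PySem.Str.strip l == "")) with
      | none => 0
      | some line =>
        let stripped := line.toList.dropWhile (fun c => c == ' ' || c == '\t')
        let pref := PySem.List.slice line.toList none
          (some ((line.toList.length : Int) - (stripped.length : Int)))
        (pref.count ' ' : Int) + 2 * (pref.count '\t' : Int) := by
  induction lines with
  | nil => simp [pvALines]
  | cons l rest ih =>
    by_cases h : PySem.Str.strip l = ""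
    · simpa [pvALines, List.find?_cons, h] using ih
    · have hb : (!(PySem.Str.strip l == "")) = true := by simpa using h
      simp only [pvALines, if_neg h, List.find?_cons, hb]
      rw [pv_prefix_eq_takeWhile, pvALoop_eq]
      ring

-- ===== VERDICT (by name: the statement is the Claim_ definition above) =====
theorem count_indent_columns_py_spec : Claim_equal_count_indent_columns_py := by
  intro raw_text _
  unfold Spec_count_indent_columns_py count_indent_columns_py count_indent_columns_py_alt
  exact pvALines_eq _
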